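-- pv_equiv track=rewrite | github.com/ND0322/CompetitiveProgramming | CF/C_Bewitching_Stargazer.py | find_contributing_indices
-- ===== SOURCE A (Python) =====
-- def find_contributing_indices(n, k):
--     result = []
--     # We start with the segment [1, n]
--     l, r = 1, n
--
--     while r - l + 1 >= k:
--         # Calculate the middle index
--         m = (l + r) // 2
--         # If the length of the segment is odd, this m is a contributing index
--         if (r - l + 1) % 2 == 1:
--             result.append(m)
--
--         # Move to the next smaller segments
--         # If the segment length is odd, we can split into [l, m-1] and [m+1, r]
--         # If the segment length is even, we split into two equal halves
--         if (r - l + 1) % 2 == 0: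
--             # Even length segment -> split into two halves
--             r = m - 1
--         else:
--             # Odd length segment -> process recursively into two subsegments
--             l = m + 1
--             r = m - 1
--
--     return result
-- ===== SOURCE B (Python) =====
-- def find_contributing_indices(n, k):
--     # A's loop emits at most one index: the midpoint of the first odd-length
--     # segment it reaches, provided that segment is still at least k long.
--     if n < k:
--         return []
--     s = n + 2
--     while s % 2 == 0:
--         s //= 2
--     r = s - 2
--     return [(r + 1) // 2] if r >= k else []
-- ===== Notes on version B (the rewrite author's own statement) =====
-- stated objective: simpler
-- what changed: A simulates the shrinking segment [l,r] with a stateful while-loop appending midpoints; B observes the loop emits at most one index and computes it in closed form: the odd part of n+2 gives the first odd segment length, and a single comparison against k decides between [] and one midpoint.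
import Mathlib
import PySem

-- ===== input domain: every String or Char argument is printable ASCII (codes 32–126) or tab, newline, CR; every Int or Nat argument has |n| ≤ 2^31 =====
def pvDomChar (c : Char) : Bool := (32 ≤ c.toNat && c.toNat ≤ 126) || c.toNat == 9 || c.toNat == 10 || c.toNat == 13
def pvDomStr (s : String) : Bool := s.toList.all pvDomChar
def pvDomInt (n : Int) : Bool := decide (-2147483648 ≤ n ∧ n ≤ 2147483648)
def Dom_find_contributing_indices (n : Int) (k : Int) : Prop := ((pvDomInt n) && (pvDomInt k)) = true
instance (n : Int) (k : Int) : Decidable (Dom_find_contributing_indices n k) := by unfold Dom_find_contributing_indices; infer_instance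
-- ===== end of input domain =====

-- B replaces A's segment-halving while-loop by a closed form: the single possible
-- contributing index comes from the odd part of n+2 (objective: simpler).


-- ===== PORT A =====
-- the while-loop of A; fuel only makes the Lean function total (the Python loop
-- diverges for k ≤ -1, excluded by Pre_ below; inside Pre_ the fuel is ample)
def pvALoop (k : Int) : Nat → Int → Int → List Int → List Int
  | 0, _, _, acc => acc
  | f + 1, l, r, acc =>
    if k ≤ r - l + 1 then
      let m := PySem.Int.floordiv (l + r) 2
      let acc' := if PySem.Int.mod (r - l + 1) 2 = 1 then acc ++ [m] else acc
      if PySem.Int.mod (r - l + 1) 2 = 0 then pvALoop k f l (m - 1) acc'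
      else pvALoop k f (m + 1) (m - 1) acc'
    else acc

def find_contributing_indices (n : Int) (k : Int) : List Int :=
  pvALoop k (n.toNat + 3) 1 n []

-- ===== PORT B =====
-- Source B's `while s % 2 == 0: s //= 2`; the `1 ≤ s` guard only makes it total
-- (Source B never reaches the loop with s ≤ 0 on inputs satisfying Pre_)
def pvStrip (s : Int) : Int :=
  if h : PySem.Int.mod s 2 = 0 ∧ 1 ≤ s then pvStrip (PySem.Int.floordiv s 2) else s
termination_by s.toNat
decreasing_by
  rw [PySem.Int.floordiv_eq_ediv_of_pos (by omega : (0:Int) < 2)]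
  have h2 := PySem.Int.mod_eq_emod_of_pos (a := s) (b := 2) (by omega)
  omega

def find_contributing_indices_alt (n : Int) (k : Int) : List Int :=
  if n < k then []
  else
    let s := pvStrip (n + 2)
    let r := s - 2
    if k ≤ r then [PySem.Int.floordiv (r + 1) 2] else []

-- ===== PRECONDITION & SPEC =====
-- Pre_ excludes exactly the inputs (k ≤ -1 and n ≥ k) on which the Python A never
-- returns (its while-loop runs forever once the segment length reaches -1).
def Pre_find_contributing_indices (n : Int) (k : Int) : Prop := 0 ≤ k ∨ n < k
instance (n : Int) (k : Int) : Decidable (Pre_find_contributing_indices n k) := by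
  unfold Pre_find_contributing_indices; infer_instance

def pvWitness_find_contributing_indices : Int × Int := (10, 3)

def Spec_find_contributing_indices (n : Int) (k : Int) (out : List Int) : Prop :=
  out = find_contributing_indices_alt n k
instance (n : Int) (k : Int) (out : List Int) : Decidable (Spec_find_contributing_indices n k out) := by
  unfold Spec_find_contributing_indices; infer_instance

-- ===== CLAIM (what is proved, stated in full; the proofs are below) =====
def Claim_equal_find_contributing_indices : Prop :=
  ∀ (n : Int) (k : Int), Dom_find_contributing_indices n k →
    Pre_find_contributing_indices n k →
    Spec_find_contributing_indices n k (find_contributing_indices n k)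

-- ===== LEMMAS AND PROOFS =====

theorem pvStrip_le (s : Int) : pvStrip s ≤ s := by
  induction s using pvStrip.induct with
  | case1 s h ih =>
    rw [pvStrip, dif_pos h]
    have := PySem.Int.floordiv_eq_ediv_of_pos (a := s) (b := 2) (by omega)
    omega
  | case2 s h => rw [pvStrip, dif_neg h]

theorem pvStrip_odd (s : Int) (h : PySem.Int.mod s 2 ≠ 0) : pvStrip s = s := by
  rw [pvStrip, dif_neg]; exact fun hc => h hc.1

theorem pvStrip_even (s : Int) (h0 : PySem.Int.mod s 2 = 0) (h1 : 1 ≤ s) :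
    pvStrip s = pvStrip (PySem.Int.floordiv s 2) := by
  rw [pvStrip, dif_pos ⟨h0, h1⟩]

-- the loop with l = 1 and length L computes the closed form of B
theorem pvKey (k : Int) (hk : 0 ≤ k) :
    ∀ (f : Nat) (L : Int) (acc : List Int), L.toNat + 3 ≤ f →
      pvALoop k f 1 L acc =
        acc ++ (if k ≤ pvStrip (L + 2) - 2
                then [PySem.Int.floordiv (pvStrip (L + 2) - 2 + 1) 2] else []) := by
  intro f
  induction f using Nat.strong_induction_on with
  | _ f ih =>
    intro L acc hf
    obtain ⟨f, rfl⟩ : ∃ f', f = f' + 1 := ⟨f - 1, by omega⟩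
    rw [pvALoop]
    have hL1 : L - 1 + 1 = L := by ring
    by_cases hkL : k ≤ L - 1 + 1
    · rw [if_pos hkL]
      rw [hL1] at hkL
      have hmodL : PySem.Int.mod (L - 1 + 1) 2 = L % 2 := by
        rw [hL1]; exact PySem.Int.mod_eq_emod_of_pos (by omega)
      have hdiv : PySem.Int.floordiv (1 + L) 2 = (1 + L) / 2 :=
        PySem.Int.floordiv_eq_ediv_of_pos (by omega)
      by_cases hm : L % 2 = 0
      · -- even length: r ← m - 1, i.e. L ← L/2 - 1
        rw [hmodL, hm]
        simp only [if_neg (by omega : ¬ ((0:Int) = 1))]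
        have hm' : PySem.Int.floordiv (1 + L) 2 - 1 = L / 2 - 1 := by
          rw [hdiv]; omega
        rw [hm']
        -- strip one factor of 2 from L + 2
        have hstep : pvStrip (L + 2) = pvStrip (L / 2 - 1 + 2) := by
          have he : PySem.Int.mod (L + 2) 2 = 0 := by
            rw [PySem.Int.mod_eq_emod_of_pos (by omega)]; omega
          rw [pvStrip_even (L + 2) he (by omega)]
          congr 1
          rw [PySem.Int.floordiv_eq_ediv_of_pos (by omega)]
          omega
        rw [hstep]
        by_cases hL2 : 2 ≤ L
        · exact ih f (by omega) (L / 2 - 1) acc (by omega)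
        · -- L = 0 (and k = 0): one more unfolding ends the loop
          have hL0 : L = 0 := by omega
          subst hL0
          obtain ⟨f, rfl⟩ : ∃ f', f = f' + 1 := ⟨f - 1, by omega⟩
          rw [pvALoop]
          norm_num
          rw [if_neg (by omega : ¬ k ≤ (-1:Int))]
          rw [pvStrip_odd 1 (by decide), if_neg (by omega : ¬ k ≤ (1:Int) - 2)]
          simp
      · -- odd length: append m, then the loop ends
        have hm1 : L % 2 = 1 := by omega
        rw [hmodL, hm1]
        simp only [if_neg (by omega : ¬ ((1:Int) = 0))]
        simp only [if_true]
        obtain ⟨f, rfl⟩ : ∃ f', f = f' + 1 := ⟨f - 1, by omega⟩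
        rw [pvALoop]
        rw [if_neg (by omega :
          ¬ k ≤ PySem.Int.floordiv (1 + L) 2 - 1 - (PySem.Int.floordiv (1 + L) 2 + 1) + 1)]
        have hodd : pvStrip (L + 2) = L + 2 := by
          apply pvStrip_odd
          rw [PySem.Int.mod_eq_emod_of_pos (by omega)]
          omega
        rw [hodd, if_pos (by omega : k ≤ L + 2 - 2)]
        have : PySem.Int.floordiv (L + 2 - 2 + 1) 2 = PySem.Int.floordiv (1 + L) 2 := by
          congr 1; ring
        rw [this]
    · -- length already below k: loop returns acc; B's closed form is [] too
      rw [if_neg hkL, hL1] at *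
      have hle := pvStrip_le (L + 2)
      have hnp : L + 2 ≤ 0 → pvStrip (L + 2) = L + 2 := by
        intro h0
        rw [pvStrip, dif_neg]; intro hc; omega
      by_cases hp : 1 ≤ L + 2
      · rw [if_neg (by omega : ¬ k ≤ pvStrip (L + 2) - 2)]; simp
      · rw [hnp (by omega), if_neg (by omega : ¬ k ≤ L + 2 - 2)]; simp

-- ===== VERDICT (by name: the statement is the Claim_ definition above) =====
theorem find_contributing_indices_spec : Claim_equal_find_contributing_indices := by
  intro n k _ hpre
  unfold Spec_find_contributing_indices find_contributing_indices find_contributing_indices_alt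
  by_cases hnk : n < k
  · rw [if_pos hnk, pvALoop, if_neg (by omega : ¬ k ≤ n - 1 + 1)]
  · have hk : 0 ≤ k := by
      rcases hpre with h | h
      · exact h
      · exact absurd h hnk
    rw [if_neg hnk, pvKey k hk (n.toNat + 3) n [] (by omega)]
    simp
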